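-- pv_equiv track=rewrite | github.com/jackwoodman/pave | parkes_master.py | dsp_vowel_remover
-- ===== SOURCE A (Python) =====
-- def dsp_vowel_remover(word):
--     # This function removes vowels from words.
--     vowels, new_word, has_taken = ["a","e","i","o","u"], [], False
--
--     for x in list(word)[::-1]:
--          if (x not in vowels or has_taken):
--             new_word.append(x)
--          else:
--             has_taken = True
--
--     to_return_word = "".join(new_word[::-1])
--
--     return to_return_word, (to_return_word != word)
-- ===== SOURCE B (Python) =====
-- def dsp_vowel_remover(word):
--     idx = max((i for i, c in enumerate(word) if c in "aeiou"), default=-1)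
--     if idx == -1:
--         return word, False
--     return word[:idx] + word[idx + 1:], True
-- ===== Notes on version B (the rewrite author's own statement) =====
-- stated objective: simpler
-- what changed: B locates the index of the last lowercase vowel with a single max-over-enumerate pass and splices it out with two slices, instead of A's reversing the string and rebuilding it character by character while threading a has_taken flag.
import Mathlib
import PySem

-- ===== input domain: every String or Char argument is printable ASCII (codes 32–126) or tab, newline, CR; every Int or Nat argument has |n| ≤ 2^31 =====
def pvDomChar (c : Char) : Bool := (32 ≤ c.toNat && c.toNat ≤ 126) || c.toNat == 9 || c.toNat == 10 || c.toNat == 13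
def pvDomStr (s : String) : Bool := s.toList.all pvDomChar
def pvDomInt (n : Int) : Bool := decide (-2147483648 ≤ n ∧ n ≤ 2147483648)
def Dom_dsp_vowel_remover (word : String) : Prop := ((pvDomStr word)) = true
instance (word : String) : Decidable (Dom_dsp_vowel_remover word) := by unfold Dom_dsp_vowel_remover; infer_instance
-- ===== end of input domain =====

-- B removes the last lowercase vowel by finding its index in one max-over-enumerate pass and
-- splicing it out, instead of A's reverse-and-rebuild loop with a has_taken flag (objective: simpler).

-- ===== PORT A =====
-- the for-loop over list(word)[::-1] with state (new_word, has_taken)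
def dspLoopA : List Char → List Char → Bool → List Char × Bool
  | [], acc, t => (acc, t)
  | x :: xs, acc, t =>
    if !(['a', 'e', 'i', 'o', 'u'].contains x) || t then dspLoopA xs (acc ++ [x]) t
    else dspLoopA xs acc true

def dsp_vowel_remover (word : String) : String × Bool :=
  let p := dspLoopA word.toList.reverse [] false
  let to_return_word := String.ofList p.1.reverse
  (to_return_word, to_return_word != word)

-- ===== PORT B =====
-- max((i for i, c in enumerate(word) if c in "aeiou"), default=-1)
def dspLastVowelIdx (word : String) : Int :=
  (PySem.List.enumerate word.toList).foldl
    (fun m p => if "aeiou".toList.contains p.2 then max m p.1 else m) (-1)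

def dsp_vowel_remover_alt (word : String) : String × Bool :=
  let idx := dspLastVowelIdx word
  if idx == -1 then (word, false)
  -- word[:idx] + word[idx+1:] with 0 ≤ idx < len(word): take/drop is exact here
  else (String.ofList (word.toList.take idx.toNat ++ word.toList.drop (idx.toNat + 1)), true)

-- ===== PRECONDITION & SPEC =====
def Spec_dsp_vowel_remover (word : String) (out : String × Bool) : Prop := out = dsp_vowel_remover_alt word
instance (word : String) (out : String × Bool) : Decidable (Spec_dsp_vowel_remover word out) := by unfold Spec_dsp_vowel_remover; infer_instance

-- ===== CLAIM (what is proved, stated in full; the proofs are below) =====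
def Claim_equal_dsp_vowel_remover : Prop := ∀ (word : String), Dom_dsp_vowel_remover word → Spec_dsp_vowel_remover word (dsp_vowel_remover word)

-- ===== LEMMAS AND PROOFS =====

def dspV (c : Char) : Bool := ['a', 'e', 'i', 'o', 'u'].contains c

-- removal of the first vowel of a list (what A's loop does to the reversed word)
def dspRmFirst : List Char → List Char
  | [] => []
  | x :: xs => if dspV x then xs else x :: dspRmFirst xs

-- list-level version of B's index computation
def dspLvi (cs : List Char) : Int :=
  (PySem.List.enumerate cs).foldl (fun m p => if dspV p.2 then max m p.1 else m) (-1)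

theorem dsp_aeiou_toList : "aeiou".toList = ['a', 'e', 'i', 'o', 'u'] := by decide

theorem dspLastVowelIdx_eq (word : String) : dspLastVowelIdx word = dspLvi word.toList := by
  unfold dspLastVowelIdx dspLvi dspV
  rw [dsp_aeiou_toList]

theorem dspLoopA_true (xs : List Char) : ∀ acc, dspLoopA xs acc true = (acc ++ xs, true) := by
  induction xs with
  | nil => intro acc; simp [dspLoopA]
  | cons x xs ih => intro acc; simp [dspLoopA, ih]

theorem dspLoopA_false (xs : List Char) :
    ∀ acc, (dspLoopA xs acc false).1 = acc ++ dspRmFirst xs := by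
  induction xs with
  | nil => intro acc; simp [dspLoopA, dspRmFirst]
  | cons x xs ih =>
    intro acc
    by_cases h : dspV x
    · have h' : (['a', 'e', 'i', 'o', 'u'].contains x) = true := h
      simp only [dspLoopA, h', Bool.not_true, Bool.false_or]
      rw [dspLoopA_true]
      simp [dspRmFirst, h]
    · have h' : (['a', 'e', 'i', 'o', 'u'].contains x) = false := by
        simpa [dspV] using h
      simp only [dspLoopA, h', Bool.not_false, Bool.true_or]
      rw [if_pos trivial, ih, dspRmFirst]
      simp [h]

theorem dspLvi_snoc (cs : List Char) (x : Char) (hb : dspLvi cs < (cs.length : Int)) :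
    dspLvi (cs ++ [x]) = if dspV x then (cs.length : Int) else dspLvi cs := by
  unfold dspLvi
  rw [PySem.List.enumerate_append, List.foldl_append]
  simp only [PySem.List.enumerate]
  by_cases h : dspV x
  · simp only [List.foldl_cons, List.foldl_nil, h, if_true]
    unfold dspLvi at hb
    omega
  · simp [h]

theorem dspLvi_bounds (cs : List Char) : -1 ≤ dspLvi cs ∧ dspLvi cs < (cs.length : Int) + 0 := by
  induction cs using List.reverseRecOn with
  | nil => simp [dspLvi, PySem.List.enumerate]
  | append_singleton cs x ih =>
    have hb : dspLvi cs < (cs.length : Int) := by omega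
    rw [dspLvi_snoc cs x hb]
    by_cases h : dspV x
    · simp [h]
    · simp [h]; omega

-- the main list-level fact: A's rebuilt list equals B's splice
theorem dsp_main (cs : List Char) :
    (dspRmFirst cs.reverse).reverse =
      (if dspLvi cs = -1 then cs
       else cs.take (dspLvi cs).toNat ++ cs.drop ((dspLvi cs).toNat + 1)) := by
  induction cs using List.reverseRecOn with
  | nil => simp [dspRmFirst, dspLvi, PySem.List.enumerate]
  | append_singleton cs x ih =>
    have hb := dspLvi_bounds cs
    have hsnoc := dspLvi_snoc cs x (by omega)
    rw [List.reverse_append]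
    simp only [List.reverse_singleton, List.singleton_append]
    by_cases h : dspV x
    · rw [hsnoc]
      simp only [h, if_true, dspRmFirst, List.reverse_reverse]
      have hne : ¬ ((cs.length : Int) = -1) := by omega
      rw [if_neg hne]
      have ht : (cs.length : Int).toNat = cs.length := by omega
      rw [ht]
      simp
    · have hx : dspV x = false := by simpa using h
      rw [hsnoc]
      simp only [hx, Bool.false_eq_true, if_false, dspRmFirst]
      rw [List.reverse_cons, ih]
      by_cases h0 : dspLvi cs = -1
      · simp [h0]
      · rw [if_neg h0, if_neg h0]
        have hk : (dspLvi cs).toNat < cs.length := by omega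
        rw [List.take_append_of_le_length (by omega), List.drop_append_of_le_length (by omega)]
        simp [List.append_assoc]

theorem dsp_splice_length (cs : List Char) (h : ¬ dspLvi cs = -1) :
    (cs.take (dspLvi cs).toNat ++ cs.drop ((dspLvi cs).toNat + 1)).length = cs.length - 1 := by
  have hb := dspLvi_bounds cs
  have hk : (dspLvi cs).toNat < cs.length := by omega
  simp [List.length_take, List.length_drop]
  omega

-- ===== VERDICT (by name: the statement is the Claim_ definition above) =====
theorem dsp_vowel_remover_spec : Claim_equal_dsp_vowel_remover := by
  intro word _
  unfold Spec_dsp_vowel_remover dsp_vowel_remover dsp_vowel_remover_alt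
  rw [dspLastVowelIdx_eq]
  have hmain := dsp_main word.toList
  have hloop := dspLoopA_false word.toList.reverse []
  simp only [List.nil_append] at hloop
  by_cases h : dspLvi word.toList = -1
  · have hA : (dspLoopA word.toList.reverse [] false).1.reverse = word.toList := by
      rw [hloop, hmain, if_pos h]
    simp only [hA]
    have : String.ofList word.toList = word := by
      exact String.ofList_toList
    rw [this]
    simp [h]
  · have hA : (dspLoopA word.toList.reverse [] false).1.reverse =
        word.toList.take (dspLvi word.toList).toNat ++ word.toList.drop ((dspLvi word.toList).toNat + 1) := by
      rw [hloop, hmain, if_neg h]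
    have hne : (dspLvi word.toList == -1) = false := by
      simp [h]
    simp only [hA, hne, Bool.false_eq_true, if_false]
    have hlen := dsp_splice_length word.toList h
    have hb := dspLvi_bounds word.toList
    have hpos : 0 < word.toList.length := by omega
    have hnes : String.ofList (word.toList.take (dspLvi word.toList).toNat ++ word.toList.drop ((dspLvi word.toList).toNat + 1)) ≠ word := by
      intro hcontra
      have := congrArg String.toList hcontra
      simp only [String.toList_ofList] at this
      have := congrArg List.length this
      omega
    have hb2 : (String.ofList (word.toList.take (dspLvi word.toList).toNat ++ word.toList.drop ((dspLvi word.toList).toNat + 1)) != word) = true :=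
      bne_iff_ne.mpr hnes
    rw [hb2]
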